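-- pv_equiv track=rewrite | github.com/RandomityGuy/io_dif | blender_plugin/io_dif/import_dif.py | fix_indices
-- ===== SOURCE A (Python) =====
-- def fix_indices(indices: list[int]):
--     new_indices = [0] * len(indices)
--     for i in range(len(indices)):
--         if i >= 2:
--             if i % 2 == 0:
--                 new_indices[len(indices) - 1 - (i - 2) // 2] = indices[i]
--             else:
--                 new_indices[(i + 1) // 2] = indices[i]
--         else:
--             new_indices[i] = indices[i]
--     return new_indices
-- ===== SOURCE B (Python) =====
-- def fix_indices(indices: list[int]):
--     # first two stay; sources at odd positions >=3 in order; sources at even positions >=2 reversed at the tail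
--     return indices[:2] + indices[3::2] + indices[2::2][::-1]
-- ===== Notes on version B (the rewrite author's own statement) =====
-- stated objective: simpler
-- what changed: Replaces the scatter loop with per-element modular index arithmetic by a gather of three slices: the first two elements, the odd-positioned sources in order, and the even-positioned sources reversed, concatenated.
import Mathlib
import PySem

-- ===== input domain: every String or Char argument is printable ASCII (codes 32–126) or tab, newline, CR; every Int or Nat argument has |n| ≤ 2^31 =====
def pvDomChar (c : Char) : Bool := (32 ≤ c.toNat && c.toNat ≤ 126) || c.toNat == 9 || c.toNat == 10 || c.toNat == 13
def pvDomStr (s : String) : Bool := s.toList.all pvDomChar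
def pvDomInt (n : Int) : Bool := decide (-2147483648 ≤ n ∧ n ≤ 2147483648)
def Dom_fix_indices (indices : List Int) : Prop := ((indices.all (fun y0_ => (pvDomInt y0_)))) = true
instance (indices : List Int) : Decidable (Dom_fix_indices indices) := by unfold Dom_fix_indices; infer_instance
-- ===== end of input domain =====

-- B replaces A's scatter loop (per-element modular index arithmetic into a preallocated list)
-- by a gather of three slices concatenated; objective: simpler.


-- ===== PORT A =====
-- every write new_indices[…] = indices[i] hits an in-range index, so Python's assignment
-- never raises and pySetD is exact here
def fix_indices (indices : List Int) : List Int :=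
  (PySem.List.pyRange 0 (indices.length : Int) 1).foldl
    (fun new_indices i =>
      if 2 ≤ i then
        if PySem.Int.mod i 2 == 0 then
          PySem.List.pySetD new_indices ((indices.length : Int) - 1 - PySem.Int.floordiv (i - 2) 2)
            (PySem.List.pyGetD indices i 0)
        else
          PySem.List.pySetD new_indices (PySem.Int.floordiv (i + 1) 2)
            (PySem.List.pyGetD indices i 0)
      else
        PySem.List.pySetD new_indices i (PySem.List.pyGetD indices i 0))
    (List.replicate indices.length 0)

-- ===== PORT B =====
def fix_indices_alt (indices : List Int) : List Int :=
  PySem.List.slice indices none (some 2)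
    ++ (PySem.List.slice? indices (some 3) none 2).getD []
    ++ (PySem.List.slice? ((PySem.List.slice? indices (some 2) none 2).getD []) none none (-1)).getD []

-- ===== PRECONDITION & SPEC =====
def Spec_fix_indices (indices : List Int) (out : List Int) : Prop := out = fix_indices_alt indices
instance (indices : List Int) (out : List Int) : Decidable (Spec_fix_indices indices out) := by unfold Spec_fix_indices; infer_instance

-- ===== CLAIM (what is proved, stated in full; the proofs are below) =====
def Claim_equal_fix_indices : Prop := ∀ (indices : List Int), Dom_fix_indices indices → Spec_fix_indices indices (fix_indices indices)

-- ===== LEMMAS AND PROOFS =====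

-- where A's loop iteration i writes (Nat model)
def tgt (n i : Nat) : Nat :=
  if i < 2 then i else if i % 2 = 0 then n - 1 - (i - 2) / 2 else (i + 1) / 2

-- which iteration writes position j
def inv (n j : Nat) : Nat :=
  if j < 2 then j else if 2 * j ≤ n then 2 * j - 1 else 2 * n - 2 * j

lemma inv_lt (n j : Nat) (h : j < n) : inv n j < n := by
  unfold inv; split_ifs <;> omega

lemma inv_tgt (n i : Nat) (h : i < n) : inv n (tgt n i) = i := by
  unfold tgt inv; split_ifs <;> omega

lemma tgt_inv (n j : Nat) (h : j < n) : tgt n (inv n j) = j := by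
  unfold inv tgt; split_ifs <;> omega

-- every second element, starting with the first
def everyOther {α : Type} : List α → List α
  | [] => []
  | [a] => [a]
  | a :: _ :: t => a :: everyOther t

lemma length_everyOther {α : Type} (l : List α) :
    (everyOther l).length = (l.length + 1) / 2 := by
  induction l using everyOther.induct <;> simp [everyOther, *] <;> omega

lemma getElem?_everyOther {α : Type} (l : List α) (t : Nat) :
    (everyOther l)[t]? = l[2 * t]? := by
  induction l using everyOther.induct generalizing t with
  | case1 => simp [everyOther]
  | case2 a =>
    cases t with
    | zero => simp [everyOther]
    | succ t => simp [everyOther]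
  | case3 a b tl ih =>
    cases t with
    | zero => simp [everyOther]
    | succ t =>
      have h2 : 2 * (t + 1) = 2 * t + 1 + 1 := by omega
      simp [everyOther, h2, ih]

lemma coreEO {α : Type} (l : List α) :
    (List.range ((l.length + 1) / 2)).filterMap (fun j => l[2 * j]?) = everyOther l := by
  induction l using everyOther.induct with
  | case1 => simp [everyOther]
  | case2 a => simp [everyOther]
  | case3 a b t ih =>
    have hm : ((a :: b :: t).length + 1) / 2 = (t.length + 1) / 2 + 1 := by
      simp; omega
    rw [hm, List.range_succ_eq_map, List.filterMap_cons, List.filterMap_map]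
    simp only [mul_zero, List.getElem?_cons_zero]
    have : (fun j => (a :: b :: t)[2 * Nat.succ j]?) = (fun j => t[2 * j]?) := by
      funext j
      have h2 : 2 * Nat.succ j = 2 * j + 1 + 1 := by omega
      simp [h2]
    simp only [Function.comp_def]
    rw [show (fun j => (a :: b :: t)[2 * j.succ]?) = (fun j => t[2 * j]?) from this, ih]
    rfl

-- xs[k::2] = everyOther (xs.drop k)
lemma slice?_two {α : Type} (xs : List α) (k : Nat) :
    PySem.List.slice? xs (some (k : Int)) none 2 = some (everyOther (xs.drop k)) := by
  unfold PySem.List.slice? PySem.List.sliceIndices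
  norm_num
  rw [if_neg (by omega : ¬((k:Int) < 0))]
  by_cases hk : k < xs.length
  · rw [min_eq_left (by omega : (k:Int) ≤ xs.length), if_pos (by omega : (k:Int) < xs.length)]
    have hc : (((xs.length:Int) - ↑k + 2 - 1) / 2).toNat = ((xs.drop k).length + 1) / 2 := by
      rw [List.length_drop]; omega
    have hf : (fun x : Nat => xs[((k:Int) + 2 * ↑x).toNat]?) = fun x : Nat => (xs.drop k)[2 * x]? := by
      funext x
      have h : ((k:Int) + 2 * ↑x).toNat = k + 2 * x := by omega
      rw [h, List.getElem?_drop]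
    rw [hc, hf, coreEO]
  · rw [min_eq_right (by omega : (xs.length:Int) ≤ k), if_neg (by omega)]
    simp [List.drop_eq_nil_of_le (by omega : xs.length ≤ k), everyOther]

lemma length_fold (xs : List Int) (k : Nat) :
    ((List.range k).foldl
      (fun acc i => acc.set (tgt xs.length i) (xs.getD i 0)) (List.replicate xs.length 0)).length
      = xs.length := by
  induction k with
  | zero => simp
  | succ k ih =>
    rw [List.range_succ, List.foldl_append]
    simp only [List.foldl_cons, List.foldl_nil, List.length_set]
    exact ih

lemma fixA_getElem (xs : List Int) (k : Nat) (hk : k ≤ xs.length) (j : Nat) (hj : j < xs.length) :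
    ((List.range k).foldl
      (fun acc i => acc.set (tgt xs.length i) (xs.getD i 0)) (List.replicate xs.length 0))[j]? =
      some (if inv xs.length j < k then xs.getD (inv xs.length j) 0 else 0) := by
  induction k with
  | zero => simp [hj]
  | succ k ih =>
    rw [List.range_succ, List.foldl_append]
    simp only [List.foldl_cons, List.foldl_nil]
    rw [List.getElem?_set]
    by_cases h : tgt xs.length k = j
    · rw [if_pos h, if_pos (by rw [length_fold]; omega)]
      rw [if_pos (by rw [← h, inv_tgt xs.length k (by omega)]; omega)]
      rw [← h, inv_tgt xs.length k (by omega)]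
    · rw [if_neg h, ih (by omega)]
      have hne : inv xs.length j ≠ k := by
        intro he
        exact h (by rw [← he, tgt_inv xs.length j hj])
      by_cases hlt : inv xs.length j < k
      · rw [if_pos hlt, if_pos (by omega)]
      · rw [if_neg hlt, if_neg (by omega)]

lemma A_eq_model (xs : List Int) :
    fix_indices xs = (List.range xs.length).foldl
      (fun acc i => acc.set (tgt xs.length i) (xs.getD i 0)) (List.replicate xs.length 0) := by
  unfold fix_indices
  rw [PySem.List.pyRange_one]
  norm_num
  rw [List.foldl_map]
  apply PySem.List.foldl_congr_mem'
  intro k hk acc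
  rw [List.mem_range] at hk
  by_cases h2 : 2 ≤ k
  · rw [if_pos (by exact_mod_cast h2)]
    by_cases he : k % 2 = 0
    · rw [if_pos (by exact_mod_cast Nat.dvd_of_mod_eq_zero he)]
      have ht : ((xs.length : Int) - 1 - ((k : Int) - 2) / 2) =
          ((xs.length - 1 - (k - 2) / 2 : Nat) : Int) := by omega
      rw [ht, PySem.List.pySetD_natCast, PySem.List.pyGetD_natCast]
      unfold tgt
      rw [if_neg (by omega), if_pos he]
      simp [List.getD]
    · rw [if_neg (by omega)]
      have ht : (((k : Int) + 1) / 2) = (((k + 1) / 2 : Nat) : Int) := by omega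
      rw [ht, PySem.List.pySetD_natCast, PySem.List.pyGetD_natCast]
      unfold tgt
      rw [if_neg (by omega), if_neg he]
      simp [List.getD]
  · rw [if_neg (by omega), PySem.List.pySetD_natCast, PySem.List.pyGetD_natCast]
    unfold tgt
    rw [if_pos (by omega)]
    simp [List.getD]

lemma B_eq_model (xs : List Int) :
    fix_indices_alt xs =
      xs.take 2 ++ everyOther (xs.drop 3) ++ (everyOther (xs.drop 2)).reverse := by
  unfold fix_indices_alt
  have h3 : PySem.List.slice? xs (some 3) none 2 = some (everyOther (xs.drop 3)) := by
    simpa using slice?_two xs 3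
  have h2 : PySem.List.slice? xs (some 2) none 2 = some (everyOther (xs.drop 2)) := by
    simpa using slice?_two xs 2
  have h1 : PySem.List.slice xs none (some 2) = xs.take 2 := by
    simpa using PySem.List.slice_to_natCast xs 2
  rw [h1, h3, h2]
  simp [PySem.List.slice?_none_none_neg_one]

lemma B_getElem (xs : List Int) (j : Nat) (hj : j < xs.length) :
    (xs.take 2 ++ everyOther (xs.drop 3) ++ (everyOther (xs.drop 2)).reverse)[j]? =
      some (xs.getD (inv xs.length j) 0) := by
  have h2 : (everyOther (xs.drop 3)).length = (xs.length - 3 + 1) / 2 := by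
    rw [length_everyOther, List.length_drop]
  have h3 : (everyOther (xs.drop 2)).length = (xs.length - 2 + 1) / 2 := by
    rw [length_everyOther, List.length_drop]
  have hinv : inv xs.length j < xs.length := inv_lt xs.length j hj
  by_cases c1 : j < 2
  · rw [List.getElem?_append_left (by rw [List.length_append, List.length_take, h2]; omega),
      List.getElem?_append_left (by rw [List.length_take]; omega),
      List.getElem?_take_of_lt c1, List.getElem?_eq_getElem hj]
    unfold inv
    rw [if_pos c1, List.getD_eq_getElem xs 0 hj]
  · by_cases c2 : j < 2 + (xs.length - 3 + 1) / 2
    · rw [List.getElem?_append_left (by rw [List.length_append, List.length_take, h2]; omega),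
        List.getElem?_append_right (by rw [List.length_take]; omega)]
      have hje : j - (xs.take 2).length = j - 2 := by rw [List.length_take]; omega
      rw [hje, getElem?_everyOther, List.getElem?_drop]
      have hidx : 3 + 2 * (j - 2) = inv xs.length j := by
        unfold inv
        rw [if_neg c1, if_pos (by omega)]
        omega
      rw [hidx, List.getElem?_eq_getElem hinv, List.getD_eq_getElem xs 0 hinv]
    · rw [List.getElem?_append_right (by rw [List.length_append, List.length_take, h2]; omega)]
      have hje : j - ((xs.take 2) ++ everyOther (xs.drop 3)).length
          = j - 2 - (xs.length - 3 + 1) / 2 := by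
        rw [List.length_append, List.length_take, h2]; omega
      rw [hje, List.getElem?_reverse (by rw [h3]; omega), h3,
        getElem?_everyOther, List.getElem?_drop]
      have hidx : 2 + 2 * ((xs.length - 2 + 1) / 2 - 1 - (j - 2 - (xs.length - 3 + 1) / 2))
          = inv xs.length j := by
        unfold inv
        rw [if_neg c1, if_neg (by omega)]
        omega
      rw [hidx, List.getElem?_eq_getElem hinv, List.getD_eq_getElem xs 0 hinv]

lemma length_B (xs : List Int) :
    (xs.take 2 ++ everyOther (xs.drop 3) ++ (everyOther (xs.drop 2)).reverse).length = xs.length := by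
  simp [length_everyOther]; omega

-- ===== VERDICT (by name: the statement is the Claim_ definition above) =====
theorem fix_indices_spec : Claim_equal_fix_indices := by
  intro xs _
  unfold Spec_fix_indices
  rw [A_eq_model, B_eq_model]
  apply List.ext_getElem?
  intro j
  by_cases hj : j < xs.length
  · rw [fixA_getElem xs xs.length le_rfl j hj, B_getElem xs j hj,
      if_pos (inv_lt xs.length j hj)]
  · rw [List.getElem?_eq_none, List.getElem?_eq_none]
    · rw [length_B]; omega
    · rw [length_fold]; omega
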